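-- pv_equiv track=rewrite | github.com/Ayesha-Nadeem1/Information-Retrieval | Assignment 3 - Doc Retrieval/Proximal nodes/proximalNodes.py | noun_indexer
-- ===== SOURCE A (Python) =====
-- def noun_indexer(documents, result, filename):
--     for noun in result:
--         if noun not in documents:
--             documents[noun] = {}
--         if filename not in documents[noun]:
--             documents[noun][filename] = 0
--         documents[noun][filename] += 1
--     return documents
-- ===== SOURCE B (Python) =====
-- def noun_indexer(documents, result, filename):
--     # Non-mutating rebuild (A mutates `documents` in place; return value is the same):
--     # count nouns once, then emit each existing entry (bumped if its noun occurs),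
--     # then one fresh entry per new noun in first-occurrence order.
--     counts = {}
--     for noun in result:
--         counts[noun] = counts.get(noun, 0) + 1
--     updated = {
--         noun: ({**inner, filename: inner.get(filename, 0) + counts[noun]}
--                if noun in counts else inner)
--         for noun, inner in documents.items()
--     }
--     for noun, c in counts.items():
--         if noun not in documents:
--             updated[noun] = {filename: c}
--     return updated
-- ===== Notes on version B (the rewrite author's own statement) =====
-- stated objective: alternative
-- what changed: A mutates the nested dict with one increment per occurrence of each noun in result; B never mutates: it builds a frequency table of result in one pass, then rebuilds the output as a comprehension over the existing entries (adding each noun's whole count at once) followed by one fresh entry per previously-unseen noun.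
import Mathlib
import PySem

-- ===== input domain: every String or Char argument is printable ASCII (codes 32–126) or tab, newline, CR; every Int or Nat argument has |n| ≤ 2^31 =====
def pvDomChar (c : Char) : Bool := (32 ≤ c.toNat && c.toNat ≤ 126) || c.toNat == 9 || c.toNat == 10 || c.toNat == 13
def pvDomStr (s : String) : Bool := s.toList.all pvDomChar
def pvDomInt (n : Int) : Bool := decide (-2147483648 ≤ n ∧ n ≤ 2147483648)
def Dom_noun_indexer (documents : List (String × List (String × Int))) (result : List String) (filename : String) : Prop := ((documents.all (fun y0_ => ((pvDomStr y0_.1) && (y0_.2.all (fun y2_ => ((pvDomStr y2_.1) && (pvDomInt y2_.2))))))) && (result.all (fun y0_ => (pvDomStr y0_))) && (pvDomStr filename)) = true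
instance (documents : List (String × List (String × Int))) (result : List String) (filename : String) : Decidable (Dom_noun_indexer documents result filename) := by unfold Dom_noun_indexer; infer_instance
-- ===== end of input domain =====

-- B never mutates: it counts result once and rebuilds the output (existing entries bumped by
-- their noun's whole count, then one fresh entry per new noun); A mutates `documents` in place
-- in Python while B builds a new dict — only the RETURN VALUE is proved equal here.

-- ===== PORT A =====
-- one iteration of A's `for noun in result` body
def nounStepA (filename : String) (d : PySem.Dict String (PySem.Dict String Int)) (noun : String) : PySem.Dict String (PySem.Dict String Int) :=
  let d := if d.contains noun then d else d.insert noun PySem.Dict.empty          -- if noun not in documents: documents[noun] = {}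
  let inner := d.getD noun PySem.Dict.empty                                       -- documents[noun]
  let inner := if inner.contains filename then inner else inner.insert filename 0 -- if filename not in …: … = 0
  d.insert noun (inner.insert filename (inner.getD filename 0 + 1))               -- documents[noun][filename] += 1

def noun_indexer (documents : List (String × List (String × Int))) (result : List String) (filename : String) : List (String × List (String × Int)) :=
  ((result.foldl (nounStepA filename)
      (PySem.Dict.mk (documents.map (fun p => (p.1, PySem.Dict.mk p.2))))).items.map
    (fun p => (p.1, p.2.items)))

-- ===== PORT B =====
def noun_indexer_alt (documents : List (String × List (String × Int))) (result : List String) (filename : String) : List (String × List (String × Int)) :=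
  -- counts[noun] = counts.get(noun, 0) + 1
  let counts := result.foldl (fun d noun => d.insert noun (d.getD noun 0 + 1)) PySem.Dict.empty
  -- the dict comprehension over documents.items() ({**inner, filename: …} = Dict.insert)
  let updated := documents.map (fun p =>
    if counts.contains p.1 then
      (p.1, ((PySem.Dict.mk p.2).insert filename
               ((PySem.Dict.mk p.2).getD filename 0 + counts.getD p.1 0)).items)
    else p)
  -- for noun, c in counts.items(): if noun not in documents: updated[noun] = {filename: c}
  updated ++ (counts.items.filter
      (fun q => !((documents.map Prod.fst).contains q.1))).map
    (fun q => (q.1, [(filename, q.2)]))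

-- ===== PRECONDITION & SPEC =====
-- Pre_ only encodes that `documents` really denotes a Python dict of dicts (unique keys at both
-- levels): an association list with duplicate keys corresponds to no Python input of A at all.
def Pre_noun_indexer (documents : List (String × List (String × Int))) (result : List String) (filename : String) : Prop :=
  (documents.map Prod.fst).Nodup ∧ ∀ p ∈ documents, (p.2.map Prod.fst).Nodup
instance (documents : List (String × List (String × Int))) (result : List String) (filename : String) : Decidable (Pre_noun_indexer documents result filename) := by unfold Pre_noun_indexer; infer_instance
def pvWitness_noun_indexer : (List (String × List (String × Int))) × List String × String :=
  ([("cat", [("doc1.txt", 2)]), ("dog", [])], ["cat", "fish", "cat"], "doc2.txt")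

def Spec_noun_indexer (documents : List (String × List (String × Int))) (result : List String) (filename : String) (out : List (String × List (String × Int))) : Prop := out = noun_indexer_alt documents result filename
instance (documents : List (String × List (String × Int))) (result : List String) (filename : String) (out : List (String × List (String × Int))) : Decidable (Spec_noun_indexer documents result filename out) := by unfold Spec_noun_indexer; infer_instance

-- ===== CLAIM (what is proved, stated in full; the proofs are below) =====
def Claim_equal_noun_indexer : Prop := ∀ (documents : List (String × List (String × Int))) (result : List String) (filename : String), Dom_noun_indexer documents result filename → Pre_noun_indexer documents result filename → Spec_noun_indexer documents result filename (noun_indexer documents result filename)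

-- ===== LEMMAS AND PROOFS =====

-- the common shape of one update of A: add k to documents[n][filename] (creating entries as needed)
def nbump (filename n : String) (k : Int) (d : PySem.Dict String (PySem.Dict String Int)) : PySem.Dict String (PySem.Dict String Int) :=
  let d := d.setdefault n PySem.Dict.empty
  let inner := d.getD n PySem.Dict.empty
  d.insert n (inner.insert filename (inner.getD filename 0 + k))

theorem stepA_eq_nbump (fn : String) (d : PySem.Dict String (PySem.Dict String Int)) (n : String) :
    nounStepA fn d n = nbump fn n 1 d := by
  by_cases hn : d.contains n = true
  · simp only [nounStepA, nbump, if_pos hn, PySem.Dict.setdefault_of_contains _ _ hn]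
    by_cases hf : (d.getD n PySem.Dict.empty).contains fn = true
    · rw [if_pos hf]
    · rw [if_neg hf, PySem.Dict.getD_insert_self, PySem.Dict.insert_insert_self,
          PySem.Dict.getD_of_not_contains (d.getD n PySem.Dict.empty) 0 (by simpa using hf)]
  · simp only [nounStepA, nbump, if_neg hn,
      PySem.Dict.setdefault_of_not_contains _ _ (by simpa using hn),
      PySem.Dict.getD_insert_self, PySem.Dict.contains_empty, Bool.false_eq_true, if_false,
      PySem.Dict.getD_empty, PySem.Dict.insert_insert_self]

theorem contains_nbump (fn n : String) (k : Int) (d : PySem.Dict String (PySem.Dict String Int)) (x : String) :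
    (nbump fn n k d).contains x = (x == n || d.contains x) := by
  simp only [nbump]
  simp [PySem.Dict.contains_insert, PySem.Dict.contains_setdefault]

theorem nbump_nbump (fn n : String) (k : Int) (d : PySem.Dict String (PySem.Dict String Int)) :
    nbump fn n 1 (nbump fn n k d) = nbump fn n (k + 1) d := by
  simp only [nbump]
  rw [PySem.Dict.setdefault_of_contains _ _ (PySem.Dict.contains_insert_self _ _ _),
      PySem.Dict.getD_insert_self, PySem.Dict.getD_insert_self,
      PySem.Dict.insert_insert_self, PySem.Dict.insert_insert_self, add_assoc]

theorem nbump_setdefault (fn n : String) (k : Int) (d : PySem.Dict String (PySem.Dict String Int)) :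
    nbump fn n k (d.setdefault n PySem.Dict.empty) = nbump fn n k d := by
  simp only [nbump]
  rw [PySem.Dict.setdefault_of_contains _ _ (by simp [PySem.Dict.contains_setdefault])]

theorem insert_comm_of_contains {ν : Type} (d : PySem.Dict String ν) {n m : String} (v w : ν)
    (hn : d.contains n = true) (hne : m ≠ n) :
    (d.insert n v).insert m w = (d.insert m w).insert n v := by
  apply PySem.Dict.ext
  by_cases hm : d.contains m = true
  · rw [PySem.Dict.items_insert_of_contains _ _ (by simp [PySem.Dict.contains_insert, hm]),
        PySem.Dict.items_insert_of_contains _ _ hn,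
        PySem.Dict.items_insert_of_contains _ _ (by simp [PySem.Dict.contains_insert, hn]),
        PySem.Dict.items_insert_of_contains _ _ hm]
    simp only [List.map_map]
    apply List.map_congr_left
    intro p _
    by_cases h1 : p.1 = n <;> by_cases h2 : p.1 = m <;>
      simp_all [hne, Ne.symm hne]
  · rw [PySem.Dict.items_insert_of_not_contains _ _ (by simp [PySem.Dict.contains_insert, hm, hne]),
        PySem.Dict.items_insert_of_contains _ _ hn,
        PySem.Dict.items_insert_of_contains _ _ (by simp [PySem.Dict.contains_insert, hn]),
        PySem.Dict.items_insert_of_not_contains _ _ (by simp_all)]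
    simp
    exact fun h => absurd h hne

theorem nbump_comm (fn : String) {n m : String} (k : Int) (d : PySem.Dict String (PySem.Dict String Int))
    (hn : d.contains n = true) (hne : m ≠ n) :
    nbump fn m 1 (nbump fn n k d) = nbump fn n k (nbump fn m 1 d) := by
  have hsd : d.setdefault n PySem.Dict.empty = d := PySem.Dict.setdefault_of_contains _ _ hn
  by_cases hm : d.contains m = true
  · have c1 : ((d.insert n ((d.getD n PySem.Dict.empty).insert fn ((d.getD n PySem.Dict.empty).getD fn 0 + k))).contains m) = true := by
      simp [PySem.Dict.contains_insert, hm]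
    have c2 : ((d.insert m ((d.getD m PySem.Dict.empty).insert fn ((d.getD m PySem.Dict.empty).getD fn 0 + 1))).contains n) = true := by
      simp [PySem.Dict.contains_insert, hn]
    simp only [nbump, hsd, PySem.Dict.setdefault_of_contains _ _ hm,
      PySem.Dict.setdefault_of_contains _ _ c1, PySem.Dict.setdefault_of_contains _ _ c2,
      PySem.Dict.getD_insert_of_ne _ _ _ hne, PySem.Dict.getD_insert_of_ne _ _ _ (Ne.symm hne)]
    exact insert_comm_of_contains d _ _ hn hne
  · have hmf : d.contains m = false := by simpa using hm
    have c1 : ((d.insert n ((d.getD n PySem.Dict.empty).insert fn ((d.getD n PySem.Dict.empty).getD fn 0 + k))).contains m) = false := by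
      simp [PySem.Dict.contains_insert, hmf, hne]
    have c2 : ((d.insert m (PySem.Dict.empty.insert fn (PySem.Dict.empty.getD fn 0 + 1))).contains n) = true := by
      simp [PySem.Dict.contains_insert, hn]
    simp only [nbump, hsd, PySem.Dict.setdefault_of_not_contains _ _ hmf,
      PySem.Dict.setdefault_of_not_contains _ _ c1,
      PySem.Dict.getD_insert_self, PySem.Dict.insert_insert_self,
      PySem.Dict.setdefault_of_contains _ _ c2,
      PySem.Dict.getD_insert_of_ne _ _ _ (Ne.symm hne)]
    exact insert_comm_of_contains d _ _ hn hne

theorem fold_filter (fn n : String) : ∀ (rest : List String) (d : PySem.Dict String (PySem.Dict String Int)) (k : Int),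
    d.contains n = true →
    rest.foldl (nounStepA fn) (nbump fn n k d)
      = (rest.filter (fun m => m != n)).foldl (nounStepA fn) (nbump fn n (k + (rest.count n : Int)) d) := by
  intro rest
  induction rest with
  | nil => intro d k _; simp
  | cons m rest ih =>
    intro d k hn
    by_cases hmn : m = n
    · subst hmn
      have h1 : ((m :: rest).filter (fun x => x != m)) = rest.filter (fun x => x != m) := by simp
      have h2 : ((m :: rest).count m : Int) = (rest.count m : Int) + 1 := by
        simp [List.count_cons]
      rw [h1, h2, List.foldl_cons, stepA_eq_nbump, nbump_nbump, ih d (k + 1) hn]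
      congr 2
      ring
    · have h1 : ((m :: rest).filter (fun x => x != n)) = m :: rest.filter (fun x => x != n) := by
        simp [hmn]
      have h2 : ((m :: rest).count n : Int) = (rest.count n : Int) := by
        simp [List.count_cons, hmn]
      have hn' : (nbump fn m 1 d).contains n = true := by
        rw [contains_nbump]; simp [hn]
      rw [h1, h2, List.foldl_cons, List.foldl_cons, stepA_eq_nbump,
          nbump_comm fn k d hn hmn, ih (nbump fn m 1 d) k hn',
          ← nbump_comm fn (k + (rest.count n : Int)) d hn hmn, ← stepA_eq_nbump]

theorem foldl_add_filter (n : String) : ∀ (l : List String) (s : PySem.Set String), n ∈ s →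
    l.foldl PySem.Set.add s = (l.filter (fun m => m != n)).foldl PySem.Set.add s := by
  intro l
  induction l with
  | nil => intro s _; rfl
  | cons m l ih =>
    intro s hs
    by_cases hmn : m = n
    · subst hmn
      have : PySem.Set.add s m = s := by
        simp [PySem.Set.add, PySem.Set.contains, hs]
      simp only [List.foldl_cons, this, List.filter_cons]
      simp only [bne_self_eq_false, if_false]
      exact ih s hs
    · have h1 : ((m :: l).filter (fun x => x != n)) = m :: l.filter (fun x => x != n) := by
        simp [hmn]
      have hs' : n ∈ PySem.Set.add s m := by
        simp only [PySem.Set.add]; split <;> simp [hs]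
      rw [h1, List.foldl_cons, List.foldl_cons, ih _ hs']

theorem foldl_add_cons (n : String) : ∀ (l : List String) (s : List String), (∀ x ∈ l, x ≠ n) →
    l.foldl PySem.Set.add (n :: s) = n :: l.foldl PySem.Set.add s := by
  intro l
  induction l with
  | nil => intro s _; rfl
  | cons m l ih =>
    intro s h
    have hmn : m ≠ n := h m (by simp)
    have : PySem.Set.add (n :: s) m = n :: PySem.Set.add s m := by
      have hb : (m == n) = false := by simpa using hmn
      simp only [PySem.Set.add, PySem.Set.contains, List.contains_cons, hb, Bool.false_or]
      split <;> simp
    rw [List.foldl_cons, this, ih _ (fun x hx => h x (by simp [hx])), List.foldl_cons]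

theorem dedup_cons (n : String) (l : List String) :
    PySem.List.dedup (n :: l) = n :: PySem.List.dedup (l.filter (fun m => m != n)) := by
  have e1 : PySem.Set.add PySem.Set.empty n = [n] := by simp [PySem.Set.add, PySem.Set.contains, PySem.Set.empty]
  simp only [PySem.List.dedup, PySem.Set.ofList, List.foldl_cons, e1]
  rw [foldl_add_filter n l [n] (by simp)]
  rw [foldl_add_cons n _ [] (fun x hx => by simpa using (List.mem_filter.mp hx).2)]
  rfl

theorem main_fold (fn : String) : ∀ (N : Nat) (l : List String), l.length ≤ N → ∀ (d : PySem.Dict String (PySem.Dict String Int)),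
    l.foldl (nounStepA fn) d
      = (PySem.List.dedup l).foldl (fun acc m => nbump fn m (l.count m : Int) acc) d := by
  intro N
  induction N with
  | zero =>
    intro l hl d
    have : l = [] := List.eq_nil_of_length_eq_zero (Nat.le_zero.mp hl)
    subst this; rfl
  | succ N ih =>
    intro l hl d
    cases l with
    | nil => rfl
    | cons n rest =>
      have hn0 : (d.setdefault n PySem.Dict.empty).contains n = true := by
        simp [PySem.Dict.contains_setdefault]
      have step1 : (n :: rest).foldl (nounStepA fn) d
          = (rest.filter (fun m => m != n)).foldl (nounStepA fn)
              (nbump fn n (1 + (rest.count n : Int)) d) := by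
        rw [List.foldl_cons, stepA_eq_nbump, ← nbump_setdefault,
            fold_filter fn n rest _ 1 hn0, nbump_setdefault]
      rw [step1, dedup_cons]
      rw [ih (rest.filter (fun m => m != n)) (by
            have := List.length_filter_le (fun m => m != n) rest
            simp at hl ⊢; omega) (nbump fn n (1 + (rest.count n : Int)) d)]
      rw [List.foldl_cons]
      have hc : ((n :: rest).count n : Int) = 1 + (rest.count n : Int) := by
        simp [List.count_cons]; ring
      rw [hc]
      apply PySem.List.foldl_congr_mem
      intro acc x hx
      have hx' : x ∈ rest.filter (fun m => m != n) := (PySem.List.mem_dedup _ _).mp hx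
      have hxn : x ≠ n := by simpa using (List.mem_filter.mp hx').2
      congr 1
      rw [List.count_filter (by simpa using hxn)]
      simp [List.count_cons, Ne.symm hxn]

-- items of one nbump, key already present: update in place
theorem nbump_items_of_contains (fn m : String) (k : Int) (D : PySem.Dict String (PySem.Dict String Int))
    (hm : D.contains m = true) (hnd : D.keys.Nodup) :
    (nbump fn m k D).items
      = D.items.map (fun p => if p.1 = m then (p.1, p.2.insert fn (p.2.getD fn 0 + k)) else p) := by
  simp only [nbump, PySem.Dict.setdefault_of_contains _ _ hm]
  rw [PySem.Dict.items_insert_of_contains _ _ hm]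
  apply List.map_congr_left
  intro p hp
  by_cases h1 : p.1 = m
  · have : D.getD m PySem.Dict.empty = p.2 := by
      subst h1; exact PySem.Dict.getD_of_mem_items _ (by simpa using hp) hnd _
    simp [h1, this]
  · simp [h1]

-- items of one nbump, fresh key: append at the end
theorem nbump_items_of_not_contains (fn m : String) (k : Int) (D : PySem.Dict String (PySem.Dict String Int))
    (hm : D.contains m = false) :
    (nbump fn m k D).items = D.items ++ [(m, PySem.Dict.empty.insert fn (0 + k))] := by
  simp only [nbump, PySem.Dict.setdefault_of_not_contains _ _ hm,
    PySem.Dict.getD_insert_self, PySem.Dict.getD_empty]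
  rw [PySem.Dict.items_insert_of_contains _ _ (PySem.Dict.contains_insert_self _ _ _),
      PySem.Dict.items_insert_of_not_contains _ _ hm, List.map_append]
  have hmem : m ∉ D.keys := fun h => by
    simp [(PySem.Dict.contains_iff_mem_keys D m).mpr h] at hm
  have : D.items.map (fun p => if p.1 == m then (m, PySem.Dict.empty.insert fn (0 + k)) else p) = D.items := by
    apply List.map_congr_left ?_ |>.trans (List.map_id _)
    intro p hp
    have : p.1 ≠ m := by
      intro h
      exact hmem (h ▸ PySem.Dict.mem_keys_of_mem_items _ hp)
    simp [this]
  rw [this]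
  simp

theorem keys_nbump_nodup (fn m : String) (k : Int) (D : PySem.Dict String (PySem.Dict String Int))
    (hnd : D.keys.Nodup) : (nbump fn m k D).keys.Nodup := by
  by_cases hm : D.contains m = true
  · have : (nbump fn m k D).keys = D.keys := by
      simp only [PySem.Dict.keys, nbump_items_of_contains fn m k D hm hnd, List.map_map]
      apply List.map_congr_left
      intro p _
      by_cases h1 : p.1 = m <;> simp [h1]
    rw [this]; exact hnd
  · have hmf : D.contains m = false := by simpa using hm
    have : (nbump fn m k D).keys = D.keys ++ [m] := by
      simp only [PySem.Dict.keys]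
      rw [nbump_items_of_not_contains fn m k D hmf]
      simp
    have hmem : m ∉ D.keys := fun h => by
      simp [(PySem.Dict.contains_iff_mem_keys D m).mpr h] at hmf
    rw [this]
    simp only [List.nodup_append]
    refine ⟨hnd, List.nodup_singleton m, ?_⟩
    intro x hx y hy
    have hy' : y = m := by simpa using hy
    subst hy'
    exact fun hxy => hmem (hxy ▸ hx)

-- the fold of nbump over DISTINCT nouns: existing entries updated in place, fresh nouns appended
theorem fold_nbump_items (fn : String) (c : String → Int) :
    ∀ (L : List String), L.Nodup → ∀ (D : PySem.Dict String (PySem.Dict String Int)), D.keys.Nodup →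
    (L.foldl (fun acc m => nbump fn m (c m) acc) D).items
      = D.items.map (fun p => if L.contains p.1 then (p.1, p.2.insert fn (p.2.getD fn 0 + c p.1)) else p)
        ++ (L.filter (fun m => !(D.contains m))).map (fun m => (m, PySem.Dict.empty.insert fn (0 + c m))) := by
  intro L
  induction L with
  | nil =>
    intro _ D _
    simp
  | cons m L ih =>
    intro hnd D hD
    have hmL : m ∉ L := (List.nodup_cons.mp hnd).1
    have hndL : L.Nodup := (List.nodup_cons.mp hnd).2
    rw [List.foldl_cons]
    by_cases hm : D.contains m = true
    · rw [ih hndL _ (keys_nbump_nodup fn m (c m) D hD)]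
      congr 1
      · rw [nbump_items_of_contains fn m (c m) D hm hD, List.map_map]
        apply List.map_congr_left
        intro p _
        by_cases h1 : p.1 = m
        · simp [h1, hmL, List.contains_cons]
        · simp [h1, List.contains_cons]
      · have hfilter : L.filter (fun x => !((nbump fn m (c m) D).contains x))
            = L.filter (fun x => !(D.contains x)) := by
          apply List.filter_congr
          intro x hx
          have hxm : x ≠ m := fun h => hmL (h ▸ hx)
          rw [contains_nbump]
          simp [hxm]
        rw [hfilter, List.filter_cons]
        simp [hm]
    · have hmf : D.contains m = false := by simpa using hm
      rw [ih hndL _ (keys_nbump_nodup fn m (c m) D hD)]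
      rw [nbump_items_of_not_contains fn m (c m) D hmf, List.map_append]
      have hfresh : (L.filter (fun x => !((nbump fn m (c m) D).contains x)))
          = L.filter (fun x => !(D.contains x)) := by
        apply List.filter_congr
        intro x hx
        have hxm : x ≠ m := fun h => hmL (h ▸ hx)
        rw [contains_nbump]
        simp [hxm]
      rw [hfresh]
      have hsingle : [(m, PySem.Dict.empty.insert fn (0 + c m))].map
          (fun p => if L.contains p.1 then (p.1, p.2.insert fn (p.2.getD fn 0 + c p.1)) else p)
          = [(m, PySem.Dict.empty.insert fn (0 + c m))] := by
        simp only [List.map_cons, List.map_nil]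
        rw [if_neg (by simpa using hmL)]
      rw [hsingle]
      have hmain : D.items.map (fun p => if L.contains p.1 then (p.1, p.2.insert fn (p.2.getD fn 0 + c p.1)) else p)
          = D.items.map (fun p => if (m :: L).contains p.1 then (p.1, p.2.insert fn (p.2.getD fn 0 + c p.1)) else p) := by
        apply List.map_congr_left
        intro p hp
        have hpm : p.1 ≠ m := by
          intro h
          have := PySem.Dict.mem_keys_of_mem_items _ hp
          rw [h] at this
          exact absurd ((PySem.Dict.contains_iff_mem_keys D m).mpr this) (by simp [hmf])
        have : ((m :: L).contains p.1) = L.contains p.1 := by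
          simp [List.contains_cons, hpm]
        rw [this]
      rw [hmain, List.filter_cons]
      simp [hmf, List.append_assoc]

-- ===== VERDICT (by name: the statement is the Claim_ definition above) =====
theorem noun_indexer_spec : Claim_equal_noun_indexer := by
  intro documents result filename _ hpre
  unfold Spec_noun_indexer noun_indexer noun_indexer_alt
  rw [main_fold filename result.length result le_rfl]
  have hDkeys : (PySem.Dict.mk (documents.map (fun p => (p.1, PySem.Dict.mk p.2)))).keys.Nodup := by
    simp only [PySem.Dict.keys, PySem.Dict.items, List.map_map]
    simpa [Function.comp] using hpre.1
  rw [fold_nbump_items filename (fun m => (result.count m : Int)) (PySem.List.dedup result)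
        (PySem.List.nodup_dedup result) _ hDkeys]
  rw [show (result.foldl (fun d noun => d.insert noun (d.getD noun 0 + 1)) PySem.Dict.empty)
        = PySem.Dict.counter result from PySem.Dict.foldl_insert_getD_add_one_eq_counter result]
  rw [List.map_append]
  congr 1
  · -- existing entries
    simp only [PySem.Dict.items, List.map_map]
    apply List.map_congr_left
    intro p _
    by_cases hmem : p.1 ∈ result
    · have h1 : ((PySem.List.dedup result).contains p.1) = true := by
        simp [PySem.List.mem_dedup, hmem]
      have h2 : ((PySem.Dict.counter result).contains p.1) = true := by
        simp [PySem.Dict.contains_counter, hmem]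
      simp [Function.comp, hmem, h1, h2, PySem.Dict.getD_counter]
    · have h1 : ((PySem.List.dedup result).contains p.1) = false := by
        simp [PySem.List.mem_dedup, hmem]
      have h2 : ((PySem.Dict.counter result).contains p.1) = false := by
        simp [PySem.Dict.contains_counter, hmem]
      simp [Function.comp, hmem, h1, h2]
  · -- fresh nouns
    rw [PySem.Dict.items_counter, List.filter_map, List.map_map, List.map_map,
        PySem.List.dedup_eq_ofList]
    have hfil : (PySem.Set.ofList result).filter
          (fun m => !((PySem.Dict.mk (documents.map (fun p => (p.1, PySem.Dict.mk p.2)))).contains m))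
        = (PySem.Set.ofList result).filter
          ((fun q => !((documents.map Prod.fst).contains q.1)) ∘ (fun k => (k, (result.count k : Int)))) := by
      apply List.filter_congr
      intro x _
      have : (PySem.Dict.mk (documents.map (fun p => (p.1, PySem.Dict.mk p.2)))).contains x
          = (documents.map Prod.fst).contains x := by
        rw [Bool.eq_iff_iff]
        simp [PySem.Dict.contains_iff_mem_keys, PySem.Dict.keys, List.mem_map]
      simp [Function.comp, this]
    rw [hfil]
    apply List.map_congr_left
    intro m _
    have he : (PySem.Dict.empty.insert filename ((result.count m : Int))).items
        = [(filename, (result.count m : Int))] := by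
      rw [PySem.Dict.items_insert_of_not_contains _ _ (by simp)]
      rfl
    simp [Function.comp, he]
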